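-- pv_equiv track=rewrite | github.com/deeplook/dirplot | src/dirplot/__main__.py | _inject_legend_default
-- ===== SOURCE A (Python) =====
-- def _inject_legend_default(argv: list[str]) -> list[str]:
--     """If ``--legend`` appears without a following integer, insert ``20``.
--
--     This lets users write ``--legend`` as a bare flag (meaning "use the
--     default of 20 entries") while also allowing ``--legend 10`` for a
--     custom limit.
--     """
--     result: list[str] = []
--     i = 0
--     while i < len(argv):
--         arg = argv[i]
--         if arg == "--legend":
--             result.append(arg)
--             next_arg = argv[i + 1] if i + 1 < len(argv) else ""
--             try:
--                 int(next_arg)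
--                 result.append(next_arg)
--                 i += 2
--             except ValueError:
--                 result.append("20")
--                 i += 1
--         else:
--             result.append(arg)
--             i += 1
--     return result
-- ===== SOURCE B (Python) =====
-- def _inject_legend_default(argv: list[str]) -> list[str]:
--     """Pending-flag pass: after emitting --legend, the next arg is taken as
--     its count if int-like, else '20' is inserted and the arg is reprocessed."""
--     result: list[str] = []
--     pending = False
--     for arg in argv:
--         if pending:
--             pending = False
--             try:
--                 int(arg)
--                 result.append(arg)
--                 continue
--             except ValueError:
--                 result.append("20")
--         result.append(arg)
--         if arg == "--legend":
--             pending = True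
--     if pending:
--         result.append("20")
--     return result
-- ===== Notes on version B (the rewrite author's own statement) =====
-- stated objective: simpler
-- what changed: Replaces the index-with-lookahead while loop (peeking at argv[i+1] and advancing by 1 or 2) with a single for-loop over argv carrying a boolean 'pending' flag, resolving a bare --legend at the next element or after the loop.
import Mathlib
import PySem

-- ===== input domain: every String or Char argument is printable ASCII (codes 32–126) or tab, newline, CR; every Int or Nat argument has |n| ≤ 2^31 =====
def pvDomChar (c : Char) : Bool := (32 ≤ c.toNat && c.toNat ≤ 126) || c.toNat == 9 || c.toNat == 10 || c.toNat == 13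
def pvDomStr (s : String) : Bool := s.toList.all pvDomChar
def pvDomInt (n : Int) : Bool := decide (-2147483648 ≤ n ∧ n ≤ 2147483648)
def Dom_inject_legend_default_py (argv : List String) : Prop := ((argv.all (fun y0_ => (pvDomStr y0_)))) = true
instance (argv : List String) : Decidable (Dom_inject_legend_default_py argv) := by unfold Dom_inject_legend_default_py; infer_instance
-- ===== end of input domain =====

-- B replaces A's index-with-lookahead while loop by a single for-loop with a boolean 'pending' flag (simpler decomposition, same cost).

-- ===== PORT A =====
-- while-loop over index i with lookahead argv[i+1]; ported as recursion on the remaining suffix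
def injectA (acc : List String) (rest : List String) : List String :=
  match rest with
  | [] => acc
  | arg :: rest' =>
    if arg == "--legend" then
      let next_arg := match rest' with | [] => "" | n :: _ => n
      match PySem.Int.ofStr? next_arg with
      | some _ => injectA (acc ++ [arg, next_arg]) rest'.tail    -- i += 2
      | none   => injectA (acc ++ [arg, "20"]) rest'             -- ValueError: i += 1
    else injectA (acc ++ [arg]) rest'
termination_by rest.length
decreasing_by
  · cases rest' <;> simp
  · simp
  · simp

def inject_legend_default_py (argv : List String) : List String := injectA [] argv

-- ===== PORT B =====
-- for-loop over argv with a boolean 'pending' flag, trailing flag resolved after the loop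
def injectB (acc : List String) (pending : Bool) (rest : List String) : List String :=
  match rest with
  | [] => if pending then acc ++ ["20"] else acc
  | arg :: rest' =>
    if pending then
      match PySem.Int.ofStr? arg with
      | some _ => injectB (acc ++ [arg]) false rest'
      | none   => injectB (acc ++ ["20", arg]) (arg == "--legend") rest'
    else injectB (acc ++ [arg]) (arg == "--legend") rest'

def inject_legend_default_py_alt (argv : List String) : List String := injectB [] false argv

-- ===== PRECONDITION & SPEC =====
def Spec_inject_legend_default_py (argv : List String) (out : List String) : Prop := out = inject_legend_default_py_alt argv
instance (argv : List String) (out : List String) : Decidable (Spec_inject_legend_default_py argv out) := by unfold Spec_inject_legend_default_py; infer_instance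

-- ===== CLAIM (what is proved, stated in full; the proofs are below) =====
def Claim_equal_inject_legend_default_py : Prop := ∀ (argv : List String), Dom_inject_legend_default_py argv → Spec_inject_legend_default_py argv (inject_legend_default_py argv)

-- ===== LEMMAS AND PROOFS =====

-- A's continuation right after it has emitted "--legend": lookahead resolved against the list l
def afterLegend (acc : List String) (l : List String) : List String :=
  match l with
  | [] => acc ++ ["20"]
  | n :: rest =>
    match PySem.Int.ofStr? n with
    | some _ => injectA (acc ++ [n]) rest
    | none   => injectA (acc ++ ["20"]) (n :: rest)

lemma inject_both (l : List String) :
    (∀ acc, injectA acc l = injectB acc false l) ∧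
    (∀ acc, afterLegend acc l = injectB acc true l) := by
  induction l with
  | nil => constructor <;> intro acc <;> simp [injectA, injectB, afterLegend]
  | cons a rest ih =>
    have h1 : ∀ acc, injectA acc (a :: rest) = injectB acc false (a :: rest) := by
      intro acc
      by_cases ha : a = "--legend"
      · subst ha
        rw [injectA.eq_def, injectB]
        simp only [beq_self_eq_true, if_pos, Bool.false_eq_true, if_false]
        rw [← ih.2 (acc ++ ["--legend"])]
        cases rest with
        | nil =>
          have h0 : PySem.Int.ofStr? "" = none := by decide
          simp [afterLegend, h0, injectA.eq_def]
        | cons n rest' =>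
          simp only [afterLegend]
          cases PySem.Int.ofStr? n <;> simp
      · rw [injectA.eq_def, injectB]
        have hb : (a == "--legend") = false := by simp [ha]
        simp only [hb, Bool.false_eq_true, if_false]
        exact ih.1 (acc ++ [a])
    refine ⟨h1, ?_⟩
    intro acc
    rw [afterLegend, injectB]
    simp only [if_pos]
    cases h : PySem.Int.ofStr? a with
    | some v => simpa using ih.1 (acc ++ [a])
    | none =>
      rw [h1 (acc ++ ["20"])]
      rw [injectB]
      simp [List.append_assoc]

-- ===== VERDICT (by name: the statement is the Claim_ definition above) =====
theorem inject_legend_default_py_spec : Claim_equal_inject_legend_default_py := by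
  intro argv _
  unfold Spec_inject_legend_default_py inject_legend_default_py inject_legend_default_py_alt
  exact (inject_both argv).1 []
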